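-- pv_equiv track=rewrite | github.com/codinglcy/Algorithm | 프로그래머스/unrated/135808. 과일 장수/과일 장수.py | solution
-- ===== SOURCE A (Python) =====
-- def solution(k, m, score):
--     answer = 0
--     temp = []
--
--     score.sort(reverse=True)
--
--     for i in range(0, len(score), m):
--         temp.append(score[i:i+m])
--
--     if len(temp[-1]) != m:
--         temp.pop()
--
--     for box in temp:
--         answer = answer + box[-1] * m
--
--     return answer
-- ===== SOURCE B (Python) =====
-- def solution(k, m, score):
--     # Counting approach: tally multiplicities into a dict, sweep the distinct
--     # values in descending order, and for each value's run of equal elements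
--     # count arithmetically how many box-minimum positions (indices i with
--     # (i+1) % m == 0, i < number of elements in full boxes) fall inside it.
--     # No fully sorted score list and no list of boxes is ever built.
--     # (A additionally sorts `score` in place; B does not mutate `score`.)
--     cnt = {}
--     for v in score:
--         cnt[v] = cnt.get(v, 0) + 1
--     full = (len(score) // m) * m
--     total = 0
--     pos = 0
--     for v in sorted(cnt, reverse=True):
--         nxt = pos + cnt[v]
--         lo = min(pos, full)
--         hi = min(nxt, full)
--         total += (hi // m - lo // m) * v * m
--         pos = nxt
--     return total
-- ===== Notes on version B (the rewrite author's own statement) =====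
-- stated objective: alternative
-- what changed: B replaces A's sort-whole-list-then-slice-into-m-sized-boxes pass by a counting approach: it tallies multiplicities into a dict, sorts only the distinct values descending, and for each value's run counts arithmetically (hi//m - lo//m) how many box-minimum positions fall inside the run; no sorted score list and no list of boxes is ever built, and B does not mutate score.
-- outside the precondition, e.g. on solution(5, 3, []): A raises IndexError, B returns 0; on solution(5, 0, [1, 2]): A raises ValueError, B raises ZeroDivisionError; on solution(5, -1, [1, 2]): A raises IndexError, B returns 3
import Mathlib
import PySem

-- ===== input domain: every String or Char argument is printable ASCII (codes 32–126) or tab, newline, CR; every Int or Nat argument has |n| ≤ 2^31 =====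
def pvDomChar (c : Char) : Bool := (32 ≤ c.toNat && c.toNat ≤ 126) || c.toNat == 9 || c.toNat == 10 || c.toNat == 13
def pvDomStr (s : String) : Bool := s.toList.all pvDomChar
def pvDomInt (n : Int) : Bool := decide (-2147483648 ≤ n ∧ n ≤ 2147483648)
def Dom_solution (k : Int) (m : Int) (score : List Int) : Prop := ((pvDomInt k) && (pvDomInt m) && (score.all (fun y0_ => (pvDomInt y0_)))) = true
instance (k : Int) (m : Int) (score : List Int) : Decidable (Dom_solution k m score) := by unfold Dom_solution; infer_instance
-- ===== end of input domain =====

-- B replaces A's sort-the-whole-list-then-slice-into-boxes pass by a counting approach: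
-- tally multiplicities into a dict, sort only the distinct values descending, and count
-- the box-minimum positions inside each value's run arithmetically (objective: alternative).
-- A sorts `score` in place (descending); B does not mutate `score` — the equivalence proved
-- here is about the RETURN value.


-- ===== PORT A =====
-- literal transliteration of A: sort descending, append slices of length m,
-- pop the last chunk if partial, sum box[-1] * m over the remaining boxes.
def solution (k : Int) (m : Int) (score : List Int) : Int :=
  let s := PySem.List.sorted score (fun x => x) true
  let temp : List (List Int) :=
    (PySem.List.pyRange 0 (s.length : Int) m).foldl
      (fun t i => t ++ [PySem.List.slice s (some i) (some (i + m))]) []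
  -- temp[-1] raises IndexError on empty temp; excluded by Pre_solution (pyGetD default unused there)
  let temp2 : List (List Int) :=
    if ((PySem.List.pyGetD temp (-1) []).length : Int) ≠ m then temp.dropLast else temp
  temp2.foldl (fun a box => a + PySem.List.pyGetD box (-1) 0 * m) 0

-- ===== PORT B =====
-- literal transliteration of B (Source B): counting dict, distinct values sorted descending,
-- per-run arithmetic count of box-minimum positions.
def solution_alt (k : Int) (m : Int) (score : List Int) : Int :=
  let cnt := score.foldl (fun d v => PySem.Dict.insert d v (PySem.Dict.getD d v 0 + 1)) PySem.Dict.empty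
  let full : Int := PySem.Int.floordiv (score.length : Int) m * m
  let r := (PySem.List.sorted (PySem.Dict.keys cnt) (fun x => x) true).foldl
    (fun (s : Int × Int) v =>
      let nxt := s.2 + PySem.Dict.getD cnt v 0
      let lo := min s.2 full
      let hi := min nxt full
      (s.1 + (PySem.Int.floordiv hi m - PySem.Int.floordiv lo m) * v * m, nxt))
    (0, 0)
  r.1

-- ===== PRECONDITION & SPEC =====
-- A raises on empty score (IndexError from temp[-1]), on m = 0 (ValueError from range)
-- and on m < 0 (empty range, then IndexError from temp[-1]); exactly those are excluded.
def Pre_solution (k : Int) (m : Int) (score : List Int) : Prop := 1 ≤ m ∧ score ≠ []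
instance (k : Int) (m : Int) (score : List Int) : Decidable (Pre_solution k m score) := by unfold Pre_solution; infer_instance

def pvWitness_solution : Int × Int × List Int := (5, 3, [1, 2, 3, 1, 2, 3, 1])

def Spec_solution (k : Int) (m : Int) (score : List Int) (out : Int) : Prop := out = solution_alt k m score
instance (k : Int) (m : Int) (score : List Int) (out : Int) : Decidable (Spec_solution k m score out) := by unfold Spec_solution; infer_instance

-- ===== CLAIM (what is proved, stated in full; the proofs are below) =====
def Claim_equal_solution : Prop := ∀ (k : Int) (m : Int) (score : List Int), Dom_solution k m score → Pre_solution k m score → Spec_solution k m score (solution k m score)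

-- ===== LEMMAS AND PROOFS =====

-- the last element of a full box, as a total getD
theorem pv_chunk_last (s : List Int) (M j : ℕ) (hM : 1 ≤ M) (hle : M * j + M ≤ s.length) :
    PySem.List.pyGetD ((s.drop (M * j)).take M) (-1) 0 = s.getD ((j + 1) * M - 1) 0 := by
  have hlen : ((s.drop (M * j)).take M).length = M := by
    simp; omega
  have hne : (s.drop (M * j)).take M ≠ [] := by
    intro h; rw [h] at hlen; simp at hlen; omega
  rw [PySem.List.pyGetD_neg_one _ _ hne, List.getLast_eq_getElem]
  have hidx : ((s.drop (M * j)).take M).length - 1 = M - 1 := by omega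
  have h1 : M - 1 < M := by omega
  have hmul : (j + 1) * M = M * j + M := by ring
  have h2 : (j + 1) * M - 1 < s.length := by omega
  rw [List.getD_eq_getElem _ _ h2]
  simp only [hidx]
  rw [List.getElem_take, List.getElem_drop]
  congr 1
  omega

theorem pv_portA_eq (k : Int) (M : ℕ) (score : List Int) (hM : 1 ≤ M) (hne : score ≠ []) :
    solution k (M : Int) score =
      ((List.range (score.length / M)).map
        (fun j => (PySem.List.sorted score (fun x => x) true).getD ((j + 1) * M - 1) 0 * (M : Int))).sum := by
  simp only [solution]
  set s := PySem.List.sorted score (fun x => x) true with hs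
  have hlen : s.length = score.length := PySem.List.length_sorted _ _ _
  have hn1 : 1 ≤ score.length := List.length_pos_iff.mpr hne
  set n := score.length with hn
  set c := (n + M - 1) / M with hcdef
  -- step 1: the range of box starts
  have hrange : PySem.List.pyRange 0 (s.length : Int) (M : Int) =
      (List.range c).map (fun j => ((M * j : ℕ) : Int)) := by
    rw [PySem.List.pyRange_of_pos _ _ (by exact_mod_cast hM)]
    rw [if_pos (by simp [hlen]; omega)]
    have hc : (((s.length : Int) - 0 + (M : Int) - 1) / (M : Int)).toNat = c := by
      rw [hlen]
      have : ((n : Int) - 0 + (M : Int) - 1) = ((n + M - 1 : ℕ) : Int) := by omega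
      rw [this, ← Int.natCast_div, Int.toNat_natCast]
    rw [hc]
    refine List.map_congr_left ?_
    intro j _; push_cast; ring
  rw [hrange, PySem.List.foldl_append_singleton_eq_map, List.nil_append, List.map_map]
  -- step 2: each box is a take/drop chunk
  have hmap : (List.range c).map
      ((fun i => PySem.List.slice s (some i) (some (i + (M : Int)))) ∘ fun j => ((M * j : ℕ) : Int)) =
      (List.range c).map (fun j => (s.drop (M * j)).take M) := by
    refine List.map_congr_left ?_
    intro j _
    simp only [Function.comp]
    have : ((M * j : ℕ) : Int) + (M : Int) = ((M * j : ℕ) : Int) + ((M : ℕ) : Int) := by push_cast; ring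
    rw [this, PySem.List.slice_natCast_add]
  rw [hmap]
  -- step 3: facts about c and the last box
  have hq : c = if M ∣ n then n / M else n / M + 1 := by
    set q := n / M with hqdef
    set r := n % M with hrdef
    have hqr : M * q + r = n := by rw [hqdef, hrdef]; exact Nat.div_add_mod n M
    have hrM : r < M := Nat.mod_lt _ (by omega)
    have e1 : q * M = M * q := by ring
    have e2 : (q + 1) * M = M * q + M := by ring
    have e3 : (q + 2) * M = M * q + 2 * M := by ring
    rcases Nat.eq_zero_or_pos r with h0 | hpos
    · rw [if_pos (Nat.dvd_of_mod_eq_zero h0)]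
      apply Nat.div_eq_of_lt_le <;> omega
    · rw [if_neg (fun hdvd => by
        have := (Nat.mod_eq_zero_of_dvd hdvd : n % M = 0); omega)]
      apply Nat.div_eq_of_lt_le
      · omega
      · show n + M - 1 < (q + 1 + 1) * M
        have : (q + 1 + 1) * M = M * q + 2 * M := by ring
        omega
  have hc1 : 1 ≤ c := by
    rw [hcdef]
    exact (Nat.one_le_div_iff (by omega)).mpr (by omega)
  have htempne : (List.range c).map (fun j => (s.drop (M * j)).take M) ≠ [] := by
    simp; omega
  have hlast : PySem.List.pyGetD ((List.range c).map (fun j => (s.drop (M * j)).take M)) (-1) [] =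
      (s.drop (M * (c - 1))).take M := by
    rw [PySem.List.pyGetD_neg_one _ _ htempne, List.getLast_eq_getElem]
    simp
  rw [hlast]
  have hfold : List.foldl (fun a box => a + PySem.List.pyGetD box (-1) 0 * (M : Int)) 0
      ((List.range (n / M)).map (fun j => (s.drop (M * j)).take M)) =
      (List.map (fun j => s.getD ((j + 1) * M - 1) 0 * (M : Int)) (List.range (n / M))).sum := by
    rw [PySem.List.foldl_add, List.map_map, zero_add]
    refine congrArg List.sum (List.map_congr_left ?_)
    intro j hj
    have hj' := List.mem_range.mp hj
    have hle : M * j + M ≤ s.length := by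
      have h1 : (j + 1) * M ≤ (n / M) * M := Nat.mul_le_mul_right M (by omega)
      have h2 : (n / M) * M ≤ n := Nat.div_mul_le_self _ _
      have e : (j + 1) * M = M * j + M := by ring
      omega
    simp only [Function.comp]
    rw [pv_chunk_last s M j hM hle]
  by_cases hdvd : M ∣ n
  · -- all boxes full: the pop branch is not taken
    obtain ⟨q, hnq⟩ := hdvd
    have hq1 : 1 ≤ q := by
      rcases Nat.eq_zero_or_pos q with rfl | h; · omega
      · exact h
    have hcq : c = q := by
      rw [hq, if_pos ⟨q, hnq⟩, hnq, Nat.mul_div_cancel_left _ (by omega)]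
    have hnm : n / M = q := by rw [hnq, Nat.mul_div_cancel_left _ (by omega)]
    have hlastlen : ((s.drop (M * (c - 1))).take M).length = M := by
      simp [hlen, hcq]
      have e : M * (q - 1) + M = M * q := by
        cases q with
        | zero => omega
        | succ t => simp [Nat.mul_succ]
      omega
    rw [hlastlen, if_neg (by simp), hcq, ← hnm]
    exact hfold
  · -- last box partial: it is popped
    have hrpos : 1 ≤ n % M := by
      rcases Nat.eq_zero_or_pos (n % M) with h0 | h
      · exact absurd (Nat.dvd_of_mod_eq_zero h0) hdvd
      · exact h
    have hrlt : n % M < M := Nat.mod_lt _ (by omega)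
    have hqr : M * (n / M) + n % M = n := Nat.div_add_mod n M
    have hcq : c = n / M + 1 := by rw [hq, if_neg hdvd]
    have hlastlen : ((s.drop (M * (c - 1))).take M).length = n % M := by
      simp [hlen, hcq]
      omega
    rw [hlastlen, if_pos (by exact_mod_cast (by omega : ¬ ((n % M : ℕ) : Int) = (M : Int)))]
    rw [hcq, List.range_succ, List.map_append, List.map_singleton, List.dropLast_concat]
    exact hfold

-- count of x in the concatenation of the runs of a nodup value list
theorem pv_count_runs (score : List Int) (x : Int) : ∀ (vs : List Int), vs.Nodup →
    (vs.flatMap (fun v => List.replicate (score.count v) v)).count x =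
      if x ∈ vs then score.count x else 0 := by
  intro vs
  induction vs with
  | nil => simp
  | cons v rest ih =>
    intro hnd
    rw [List.flatMap_cons, List.count_append, ih hnd.of_cons]
    rw [List.count_replicate]
    by_cases hx : x = v
    · subst hx
      simp [List.mem_cons, (List.nodup_cons.mp hnd).1]
    · simp [List.mem_cons, hx, Ne.symm hx]

-- the descending sorted list is the concatenation of the runs of its distinct values
theorem pv_desc_runs (score : List Int) :
    (PySem.List.sorted (PySem.Set.ofList score) (fun x => x) true).flatMap
      (fun v => List.replicate (score.count v) v) =
    PySem.List.sorted score (fun x => x) true := by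
  set vs := PySem.List.sorted (PySem.Set.ofList score) (fun x => x) true with hvs
  have hperm_vs : vs.Perm (PySem.Set.ofList score) := PySem.List.sorted_perm _ _ _
  have hnd : vs.Nodup := hperm_vs.nodup_iff.mpr (PySem.Set.nodup_ofList score)
  have hmem : ∀ x, x ∈ vs ↔ x ∈ score := fun x =>
    hperm_vs.mem_iff.trans (PySem.Set.mem_ofList _ _)
  have hvp : vs.Pairwise (fun a b => b ≤ a) :=
    PySem.List.sorted_pairwise_rev (PySem.Set.ofList score) (fun x : Int => x)
  apply PySem.List.eq_of_perm_of_pairwise_le_of_injective (key := fun x : Int => -x)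
  · exact fun a b h => by simpa using h
  · -- permutation: both sides have the same multiset of elements as score
    refine (List.perm_iff_count.mpr ?_).trans (PySem.List.sorted_perm score _ true).symm
    intro x
    rw [pv_count_runs score x vs hnd]
    by_cases h : x ∈ vs
    · simp [h]
    · rw [if_neg h, List.count_eq_zero_of_not_mem (fun hm => h ((hmem x).mpr hm))]
  · -- the concatenation of runs is descending
    show (vs.flatMap _).Pairwise (fun a b => -a ≤ -b)
    rw [List.flatMap_def, List.pairwise_flatten]
    constructor
    · intro l hl
      obtain ⟨v, _, rfl⟩ := List.mem_map.mp hl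
      exact List.pairwise_replicate.mpr (Or.inr (le_refl _))
    · rw [List.pairwise_map]
      refine hvp.imp_of_mem ?_
      intro v w _ _ hvw
      intro x hx y hy
      rw [List.eq_of_mem_replicate hx, List.eq_of_mem_replicate hy]
      simpa using hvw
  · -- the sorted list is descending
    exact (PySem.List.sorted_pairwise_rev score (fun x : Int => x)).imp (fun h => by simpa using h)

-- the run sweep accumulates exactly the box minima of the remaining positions
theorem pv_fold_runs (score : List Int) (M : ℕ) (hM : 1 ≤ M) (desc : List Int)
    (fullN : ℕ) (hfull : fullN = desc.length / M * M) :
    ∀ (vs pre : List Int) (t : Int),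
      pre ++ vs.flatMap (fun v => List.replicate (score.count v) v) = desc →
      (vs.foldl (fun (s : Int × Int) v =>
          let nxt := s.2 + (score.count v : Int)
          let lo := min s.2 ((fullN : ℕ) : Int)
          let hi := min nxt ((fullN : ℕ) : Int)
          (s.1 + (PySem.Int.floordiv hi (M : Int) - PySem.Int.floordiv lo (M : Int)) * v * (M : Int), nxt))
        (t, (pre.length : Int))).1
      = t + ((List.range' (min pre.length fullN / M) (fullN / M - min pre.length fullN / M)).map
          (fun j => desc.getD ((j + 1) * M - 1) 0 * (M : Int))).sum := by
  intro vs
  induction vs with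
  | nil =>
    intro pre t h
    simp only [List.flatMap_nil, List.append_nil] at h
    subst h
    have h1 : fullN ≤ pre.length := hfull ▸ Nat.div_mul_le_self _ _
    have h2 : min pre.length fullN = fullN := by omega
    have h3 : fullN / M = pre.length / M := by rw [hfull, Nat.mul_div_cancel _ (by omega)]
    simp [h2]
  | cons v rest ih =>
    intro pre t h
    rw [List.flatMap_cons, ← List.append_assoc] at h
    have hpre' : (pre ++ List.replicate (score.count v) v).length = pre.length + score.count v := by
      simp
    have ihres := ih (pre ++ List.replicate (score.count v) v)
      (t + (((min (pre.length + score.count v) fullN / M : ℕ) : Int)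
        - ((min pre.length fullN / M : ℕ) : Int)) * v * (M : Int)) h
    rw [hpre'] at ihres
    rw [List.foldl_cons]
    simp only [← Nat.cast_add, ← Nat.cast_min, PySem.Int.floordiv_natCast]
    rw [ihres]
    set p := pre.length with hp
    set c := score.count v with hc
    -- arithmetic: split the index range at b
    set a := min p fullN / M with ha
    set b := min (p + c) fullN / M with hb
    set q := fullN / M with hqd
    have hab : a ≤ b := Nat.div_le_div_right (min_le_min (Nat.le_add_right p c) le_rfl)
    have hbq : b ≤ q := Nat.div_le_div_right (min_le_right _ _)
    have hsplit : List.range' a (q - a) = List.range' a (b - a) ++ List.range' b (q - b) := by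
      have := @List.range'_append a (b - a) (q - b) 1
      simp only [one_mul] at this
      rw [show a + (b - a) = b by omega] at this
      rw [show q - a = b - a + (q - b) by omega]
      exact this.symm
    -- every box-minimum index in [a, b) lands inside the run of v
    have hconst : ∀ j ∈ List.range' a (b - a),
        desc.getD ((j + 1) * M - 1) 0 * (M : Int) = v * (M : Int) := by
      intro j hj
      have hj' : a ≤ j ∧ j < b := by
        have := List.mem_range'_1.mp hj
        omega
      by_cases hpf : fullN < p
      · exfalso
        have h1 : min p fullN = fullN := by omega
        have h2 : min (p + c) fullN = fullN := by omega
        rw [ha, hb, h1, h2] at hj'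
        omega
      · have hpf' : min p fullN = p := by omega
        have hap : a = p / M := by rw [ha, hpf']
        -- lower bound: p < (j + 1) * M
        have hlow : p < (j + 1) * M := by
          have h1 : p < (p / M + 1) * M := by
            have h1 := Nat.div_add_mod p M
            have h2 := Nat.mod_lt p (show 0 < M by omega)
            have h3 : (p / M + 1) * M = M * (p / M) + M := by ring
            omega
          calc p < (p / M + 1) * M := h1
            _ ≤ (j + 1) * M := Nat.mul_le_mul_right M (by omega)
        -- upper bound: (j + 1) * M ≤ p + c
        have hhigh : (j + 1) * M ≤ p + c := by
          calc (j + 1) * M ≤ b * M := Nat.mul_le_mul_right M (by omega)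
            _ ≤ min (p + c) fullN := by rw [hb]; exact Nat.div_mul_le_self _ _
            _ ≤ p + c := min_le_left _ _
        have hM1 : 1 ≤ (j + 1) * M := by
          calc 1 = 1 * 1 := by ring
            _ ≤ (j + 1) * M := Nat.mul_le_mul (by omega) hM
        congr 1
        -- the element at that index is v
        rw [← h, List.getD_eq_getElem _ _ (by
          rw [List.length_append, List.length_append, List.length_replicate]
          have : desc.length = (pre ++ List.replicate c v ++ rest.flatMap
            (fun v => List.replicate (score.count v) v)).length := by rw [h]
          omega)]
        rw [List.getElem_append_left (by
          rw [List.length_append, List.length_replicate]; omega)]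
        rw [List.getElem_append_right (by rw [← hp]; omega)]
        simp
    rw [hsplit, List.map_append, List.sum_append]
    rw [List.map_congr_left hconst]
    have hlen' : ((List.range' a (b - a)).map (fun _ => v * (M : Int))).sum
        = ((b - a : ℕ) : Int) * (v * (M : Int)) := by
      rw [PySem.List.sum_map_const_int, List.length_range']
    rw [hlen']
    have hcast : ((b : ℕ) : Int) - ((a : ℕ) : Int) = ((b - a : ℕ) : Int) := by
      push_cast [hab]; ring
    rw [hcast]
    ring

-- B's full pipeline: the counting sweep equals the per-box sum over the descending list
theorem pv_portB_eq (k : Int) (M : ℕ) (score : List Int) (hM : 1 ≤ M) :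
    solution_alt k (M : Int) score =
      ((List.range (score.length / M)).map
        (fun j => (PySem.List.sorted score (fun x => x) true).getD ((j + 1) * M - 1) 0 * (M : Int))).sum := by
  simp only [solution_alt]
  rw [PySem.Dict.foldl_insert_getD_add_one_eq_counter, PySem.Dict.keys_counter]
  set desc := PySem.List.sorted score (fun x => x) true with hdesc
  have hlen : desc.length = score.length := PySem.List.length_sorted _ _ _
  set fullN : ℕ := score.length / M * M with hfullN
  have hfullI : PySem.Int.floordiv ((score.length : ℕ) : Int) ((M : ℕ) : Int) * ((M : ℕ) : Int)
      = ((fullN : ℕ) : Int) := by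
    rw [PySem.Int.floordiv_natCast, hfullN, Nat.cast_mul]
  have hmain := pv_fold_runs score M hM desc fullN (by rw [hlen])
    (PySem.List.sorted (PySem.Set.ofList score) (fun x => x) true) [] 0
    (by rw [List.nil_append]; exact pv_desc_runs score)
  simp only [List.length_nil, Nat.cast_zero, Nat.zero_min, Nat.zero_div,
    Nat.sub_zero, zero_add] at hmain
  refine Eq.trans ?_ (hmain.trans ?_)
  · refine congrArg Prod.fst (PySem.List.foldl_congr_mem _ _ _ _ ?_)
    intro acc x _
    show _ = _
    rw [PySem.Dict.getD_counter, hfullI]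
  · rw [List.range_eq_range',
      show fullN / M = score.length / M from by rw [hfullN, Nat.mul_div_cancel _ (by omega)]]

-- ===== VERDICT (by name: the statement is the Claim_ definition above) =====
theorem solution_spec : Claim_equal_solution := by
  intro k m score _ hpre
  obtain ⟨hm, hne⟩ := hpre
  obtain ⟨M, rfl⟩ : ∃ M : ℕ, m = (M : Int) := ⟨m.toNat, by omega⟩
  have hM : 1 ≤ M := by exact_mod_cast hm
  show solution k (M : Int) score = solution_alt k (M : Int) score
  rw [pv_portA_eq k M score hM hne, pv_portB_eq k M score hM]
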